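-- pv_equiv track=rewrite | github.com/yfranky/Readability | FeatExt/FeatExt.py | conll_sentences
-- ===== SOURCE A (Python) =====
-- def conll_sentences(data):
--     """
--     Extract sentences from conll data.
--
--     @rtype : list of sentences as lists.
--     @param data: conll data.
--     """
--     sents = []
--     sent  = []
--     for item in data:
--         if item[0] == '1': # first item of new sentence
--             # Append previous sentence in sentences.
--             # Note: probably, on first for-iteration an empty first sentence is appended. Will be removed after the for-loop
--             sents.append(sent)
--             # Start new sentence
--             sent = [item]
--         else: # inside sentence
--            sent.append(item)
--     # Append last sentence in sentences.
--     sents.append(sent)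
--     # remove empty first sentence
--     if sents[0] == []: del sents[0]
--
--     #debug_print('Sentences: {0}'.format(sents))
--     return sents
-- ===== SOURCE B (Python) =====
-- def conll_sentences(data):
--     """Index-then-slice reimplementation: collect boundary indices, then slice."""
--     bounds = [i for i, item in enumerate(data) if item[0] == '1']
--     if not bounds:
--         sents = [data]
--     else:
--         sents = [data[:bounds[0]]]
--         for a, b in zip(bounds, bounds[1:]):
--             sents.append(data[a:b])
--         sents.append(data[bounds[-1]:])
--     if sents[0] == []:
--         del sents[0]
--     return sents
-- ===== Notes on version B (the rewrite author's own statement) =====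
-- stated objective: alternative
-- what changed: Replaced the single-pass accumulator (growing the current sentence item by item and flushing it at each '1' marker) by an index-building pass that records the positions of sentence starts followed by a slicing pass that cuts the data between successive boundaries.
import Mathlib
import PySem

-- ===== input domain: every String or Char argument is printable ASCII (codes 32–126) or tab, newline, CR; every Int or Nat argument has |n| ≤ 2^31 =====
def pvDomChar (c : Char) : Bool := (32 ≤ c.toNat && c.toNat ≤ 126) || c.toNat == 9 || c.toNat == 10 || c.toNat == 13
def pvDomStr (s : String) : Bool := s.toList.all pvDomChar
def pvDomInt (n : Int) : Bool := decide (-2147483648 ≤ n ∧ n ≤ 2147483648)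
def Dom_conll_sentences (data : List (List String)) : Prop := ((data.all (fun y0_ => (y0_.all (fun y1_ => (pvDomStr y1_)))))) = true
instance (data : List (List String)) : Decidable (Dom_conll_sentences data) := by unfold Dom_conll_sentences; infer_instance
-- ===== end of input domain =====

-- B replaces A's accumulator loop by boundary-index collection plus slicing; objective: alternative decomposition.

-- ===== PORT A =====
def conll_sentences (data : List (List String)) : List (List (List String)) :=
  let r := data.foldl
    (fun (st : List (List (List String)) × List (List String)) item =>
      if PySem.List.pyGet? item 0 == some "1" then (st.1 ++ [st.2], [item]) else (st.1, st.2 ++ [item]))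
    (([] : List (List (List String))), ([] : List (List String)))
  let sents := r.1 ++ [r.2]
  match sents with
  | [] :: rest => rest
  | other => other

-- ===== PORT B =====
def conll_sentences_alt (data : List (List String)) : List (List (List String)) :=
  let bounds : List Int :=
    (PySem.List.enumerate data 0).filterMap (fun p => if PySem.List.pyGet? p.2 0 == some "1" then some p.1 else none)
  let sents : List (List (List String)) :=
    match bounds with
    | [] => [data]
    | b0 :: rest =>
      ([PySem.List.slice data none (some b0)] ++
        ((b0 :: rest).zip rest).map (fun p => PySem.List.slice data (some p.1) (some p.2))) ++
      [PySem.List.slice data (some ((b0 :: rest).getLastD 0)) none]  -- bounds[-1]; list is nonempty here so the default is never used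
  -- if sents[0] == []: del sents[0]
  if sents.head? == some [] then sents.tail else sents

-- ===== PRECONDITION & SPEC =====
-- Pre_ excludes data containing an empty token list, on which A raises IndexError at item[0].
def Pre_conll_sentences (data : List (List String)) : Prop := ∀ item ∈ data, item ≠ []
instance (data : List (List String)) : Decidable (Pre_conll_sentences data) := by
  unfold Pre_conll_sentences; infer_instance
def pvWitness_conll_sentences : List (List String) := [["1", "a"], ["2", "b"], ["1", "c"]]

def Spec_conll_sentences (data : List (List String)) (out : List (List (List String))) : Prop := out = conll_sentences_alt data
instance (data : List (List String)) (out : List (List (List String))) : Decidable (Spec_conll_sentences data out) := by unfold Spec_conll_sentences; infer_instance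

-- ===== CLAIM (what is proved, stated in full; the proofs are below) =====
def Claim_equal_conll_sentences : Prop := ∀ (data : List (List String)), Dom_conll_sentences data → Pre_conll_sentences data → Spec_conll_sentences data (conll_sentences data)

-- ===== LEMMAS AND PROOFS =====

-- item[0] == '1'  (pyGet? is none on an empty item; those inputs raise in Python and are outside Pre_)
def pvMark (item : List String) : Bool := PySem.List.pyGet? item 0 == some "1"

-- reference splitter: current sentence c, remaining data
def pvSegs (c : List (List String)) : List (List String) → List (List (List String))
  | [] => [c]
  | x :: xs => if pvMark x then c :: pvSegs [x] xs else pvSegs (c ++ [x]) xs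

def pvConsFirst (c : List (List String)) : List (List (List String)) → List (List (List String))
  | [] => []
  | s :: ss => (c ++ s) :: ss

lemma pvConsFirst_consFirst (c d : List (List String)) (l : List (List (List String))) :
    pvConsFirst c (pvConsFirst d l) = pvConsFirst (c ++ d) l := by
  cases l <;> simp [pvConsFirst]

lemma pvSegs_consFirst (data : List (List String)) :
    ∀ c, pvSegs c data = pvConsFirst c (pvSegs [] data) := by
  induction data with
  | nil => intro c; simp [pvSegs, pvConsFirst]
  | cons x xs ih =>
    intro c
    by_cases h : pvMark x = true
    · simp [pvSegs, h, pvConsFirst]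
    · simp only [pvSegs, h, Bool.false_eq_true, if_false, List.nil_append]
      rw [ih (c ++ [x]), ih [x], pvConsFirst_consFirst]

-- A's fold flushes into pvSegs
lemma pvFoldA (data : List (List String)) :
    ∀ (s : List (List (List String))) (c : List (List String)),
    (data.foldl
      (fun (st : List (List (List String)) × List (List String)) item =>
        if PySem.List.pyGet? item 0 == some "1" then (st.1 ++ [st.2], [item]) else (st.1, st.2 ++ [item]))
      (s, c)).1 ++
    [(data.foldl
      (fun (st : List (List (List String)) × List (List String)) item =>
        if PySem.List.pyGet? item 0 == some "1" then (st.1 ++ [st.2], [item]) else (st.1, st.2 ++ [item]))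
      (s, c)).2] = s ++ pvSegs c data := by
  induction data with
  | nil => intro s c; simp [pvSegs]
  | cons x xs ih =>
    intro s c
    by_cases h : pvMark x = true
    · have h' : (PySem.List.pyGet? x 0 == some "1") = true := h
      simp only [List.foldl_cons, h', if_true, pvSegs, pvMark, ih]; simp
    · have h' : ¬ (PySem.List.pyGet? x 0 == some "1") = true := h
      simp only [List.foldl_cons, h', Bool.false_eq_true, if_false, pvSegs, pvMark, ih]

-- natural-number boundary positions
def pvNatBounds : List (List String) → List Nat
  | [] => []
  | x :: xs => if pvMark x then 0 :: (pvNatBounds xs).map (· + 1) else (pvNatBounds xs).map (· + 1)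

lemma pvBounds_eq (data : List (List String)) :
    ∀ (s : Int),
    (PySem.List.enumerate data s).filterMap (fun p => if PySem.List.pyGet? p.2 0 == some "1" then some p.1 else none)
      = (pvNatBounds data).map (fun k : Nat => s + (k : Int)) := by
  induction data with
  | nil => intro s; simp [PySem.List.enumerate_nil, pvNatBounds]
  | cons x xs ih =>
    intro s
    rw [PySem.List.enumerate_cons, List.filterMap_cons]
    have hmap : ((pvNatBounds xs).map (· + 1)).map (fun k : Nat => s + (k : Int))
        = (pvNatBounds xs).map (fun k : Nat => (s + 1) + (k : Int)) := by
      rw [List.map_map]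
      apply List.map_congr_left
      intro k _
      simp only [Function.comp_apply]
      push_cast
      ring
    by_cases h : pvMark x = true
    · have h' : (PySem.List.pyGet? x 0 == some "1") = true := h
      rw [if_pos h', pvNatBounds, if_pos h, List.map_cons, hmap, ← ih (s + 1)]
      simp
    · have h' : ¬ (PySem.List.pyGet? x 0 == some "1") = true := h
      rw [if_neg h', pvNatBounds, if_neg h, hmap, ← ih (s + 1)]

-- B's slicing phase, over natural boundary positions
def pvChunks (data : List (List String)) (bs : List Nat) : List (List (List String)) :=
  match bs with
  | [] => [data]
  | b0 :: rest =>
    ([data.take b0] ++ ((b0 :: rest).zip rest).map (fun p => (data.drop p.1).take (p.2 - p.1))) ++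
    [data.drop ((b0 :: rest).getLastD 0)]

lemma pvZip_map_succ (bs : List Nat) :
    ∀ b0, (((b0 + 1) :: bs.map (· + 1)).zip (bs.map (· + 1)))
      = ((b0 :: bs).zip bs).map (fun p => (p.1 + 1, p.2 + 1)) := by
  induction bs with
  | nil => intro b0; simp
  | cons b bs ih => intro b0; simp only [List.map_cons, List.zip_cons_cons, ih b, List.map_cons]

lemma pvGetLastD_map_succ (bs : List Nat) :
    ∀ b0, (((b0 + 1) :: bs.map (· + 1)).getLastD 0) = ((b0 :: bs).getLastD 0) + 1 := by
  induction bs with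
  | nil => intro b0; simp
  | cons b bs ih => intro b0; simpa [List.getLastD_cons] using ih b

lemma pvChunks_shift (xs : List (List String)) (x : List String) (bs : List Nat) :
    pvChunks (x :: xs) (bs.map (· + 1)) = pvConsFirst [x] (pvChunks xs bs) := by
  cases bs with
  | nil => simp [pvChunks, pvConsFirst]
  | cons b0 rest =>
    simp only [List.map_cons, pvChunks, pvConsFirst, pvZip_map_succ, pvGetLastD_map_succ]
    simp [List.take_succ_cons, List.drop_succ_cons]

lemma pvChunks_mark (xs : List (List String)) (x : List String) (bs : List Nat) :
    pvChunks (x :: xs) (0 :: bs.map (· + 1)) = [] :: pvConsFirst [x] (pvChunks xs bs) := by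
  cases bs with
  | nil => simp [pvChunks, pvConsFirst]
  | cons b0 rest =>
    simp only [List.map_cons, pvChunks, pvConsFirst, List.zip_cons_cons, pvZip_map_succ,
      List.getLastD_cons]
    simp [List.take_succ_cons, List.drop_succ_cons, pvGetLastD_map_succ]

lemma pvChunks_natBounds (data : List (List String)) :
    pvChunks data (pvNatBounds data) = pvSegs [] data := by
  induction data with
  | nil => simp [pvChunks, pvNatBounds, pvSegs]
  | cons x xs ih =>
    by_cases h : pvMark x = true
    · rw [pvNatBounds, if_pos h, pvChunks_mark, ih]
      simp [pvSegs, h, pvSegs_consFirst xs [x]]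
    · rw [pvNatBounds, if_neg h, pvChunks_shift, ih]
      simp only [pvSegs, h, Bool.false_eq_true, if_false, List.nil_append]
      rw [pvSegs_consFirst xs [x]]

lemma pvGetLastD_map_cast (bs : List Nat) :
    ∀ b0 : Nat, (((b0 :: bs).map (fun k : Nat => (k : Int))).getLastD 0)
      = (((b0 :: bs).getLastD 0 : Nat) : Int) := by
  induction bs with
  | nil => intro b0; simp
  | cons b bs ih => intro b0; simpa [List.getLastD_cons] using ih b

-- B's port equals pvChunks over pvNatBounds
lemma pvAlt_core (data : List (List String)) :
    (match (PySem.List.enumerate data 0).filterMap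
        (fun p => if PySem.List.pyGet? p.2 0 == some "1" then some p.1 else none) with
      | [] => [data]
      | b0 :: rest =>
        ([PySem.List.slice data none (some b0)] ++
          ((b0 :: rest).zip rest).map (fun p => PySem.List.slice data (some p.1) (some p.2))) ++
        [PySem.List.slice data (some ((b0 :: rest).getLastD 0)) none])
    = pvChunks data (pvNatBounds data) := by
  have h0 : ∀ (l : List Nat), l.map (fun k : Nat => (0 : Int) + (k : Int))
      = l.map (fun k : Nat => (k : Int)) := by
    intro l; apply List.map_congr_left; intro k _; omega
  rw [pvBounds_eq data 0, h0]
  cases hb : pvNatBounds data with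
  | nil => simp [pvChunks]
  | cons b0 rest =>
    simp only [List.map_cons, pvChunks]
    congr 1
    · congr 1
      · rw [PySem.List.slice_to_natCast]
      · rw [show ((b0 : Int) :: rest.map (fun k : Nat => (k : Int)))
              = (b0 :: rest).map (fun k : Nat => (k : Int)) by simp,
            List.zip_map, List.map_map]
        apply List.map_congr_left
        intro p _
        simp only [Function.comp_apply, Prod.map_fst, Prod.map_snd]
        rw [PySem.List.slice_natCast]
    · rw [show ((b0 : Int) :: rest.map (fun k : Nat => (k : Int)))
            = (b0 :: rest).map (fun k : Nat => (k : Int)) by simp,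
          pvGetLastD_map_cast, PySem.List.slice_from_natCast]

-- ===== VERDICT (by name: the statement is the Claim_ definition above) =====
theorem conll_sentences_spec : Claim_equal_conll_sentences := by
  intro data _ _
  unfold Spec_conll_sentences conll_sentences conll_sentences_alt
  dsimp only
  have hA := pvFoldA data [] []
  rw [List.nil_append] at hA
  rw [pvAlt_core data, pvChunks_natBounds data, hA]
  cases pvSegs [] data with
  | nil => simp
  | cons s rest => cases s <;> simp
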